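-- pv_equiv track=rewrite | github.com/amarantaVC/python12 | Sergio/Tarea2.3/f.py | irreducible
-- ===== SOURCE A (Python) =====
-- def irreducible(x, y):
--
--     i, irredX, irredY = 2, True, True
--
--     while (i < x and irredX):
--         if (x % i == 0):
--             irredX = False
--         i += 1
--
--     i = 2
--     while (i < y and irredY):
--         if (y % i == 0):
--             irredY = False
--         i += 1
--
--     if (irredX and irredY):
--         return True
--     else:
--         return False
-- ===== SOURCE B (Python) =====
-- def irreducible(x, y):
--     def prime_like(n):
--         if n <= 2:
--             return True
--         d = 2
--         while d * d <= n:
--             if n % d == 0: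
--                 return False
--             d += 1
--         return True
--     return prime_like(x) and prime_like(y)
-- ===== Notes on version B (the rewrite author's own statement) =====
-- stated objective: alternative
-- what changed: B trial-divides only up to sqrt(n) (stopping at the first divisor) instead of A's scan over every i in [2, n), with an explicit n <= 2 early return matching A's loop-skip behaviour.
import Mathlib
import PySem

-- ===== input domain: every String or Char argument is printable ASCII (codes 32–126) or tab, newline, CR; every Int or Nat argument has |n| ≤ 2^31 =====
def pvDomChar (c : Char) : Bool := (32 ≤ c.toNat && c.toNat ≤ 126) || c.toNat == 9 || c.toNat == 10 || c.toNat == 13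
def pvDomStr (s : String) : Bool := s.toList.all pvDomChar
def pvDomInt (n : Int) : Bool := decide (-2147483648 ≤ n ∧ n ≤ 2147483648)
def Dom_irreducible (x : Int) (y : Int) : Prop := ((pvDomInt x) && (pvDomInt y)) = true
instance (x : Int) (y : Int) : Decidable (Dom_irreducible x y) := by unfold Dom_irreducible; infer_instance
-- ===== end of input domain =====

-- B replaces A's trial division over all of [2, n) by trial division up to √n
-- (with n ≤ 2 returned True, matching A's skipped loop there): a different, bounded scan.

-- ===== PORT A =====
-- A's while loop: i counts up from 2; irred is cleared when a divisor is found (the loop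
-- condition then stops the next iteration, exactly as in Python). fuel = remaining iterations.
def irrLoop (fuel : Nat) (n : Int) (i : Int) (irred : Bool) : Bool :=
  match fuel with
  | 0 => irred
  | f + 1 =>
    if i < n ∧ irred = true then
      irrLoop f n (i + 1) (if PySem.Int.mod n i == 0 then false else irred)
    else irred

def irreducible (x : Int) (y : Int) : Bool :=
  if irrLoop (x - 2).toNat x 2 true = true ∧ irrLoop (y - 2).toNat y 2 true = true then true
  else false

-- ===== PORT B =====
-- B's while loop: d counts up from 2 while d*d ≤ n, returning false at the first divisor.
-- fuel bounds the iterations (never exhausted for the supplied value; the loop exits via d*d > n).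
def altLoop (fuel : Nat) (n : Int) (d : Int) : Bool :=
  match fuel with
  | 0 => true
  | f + 1 =>
    if d * d ≤ n then
      if PySem.Int.mod n d == 0 then false else altLoop f n (d + 1)
    else true

def primeLike (n : Int) : Bool := if n ≤ 2 then true else altLoop n.toNat n 2

def irreducible_alt (x : Int) (y : Int) : Bool := primeLike x && primeLike y

-- ===== PRECONDITION & SPEC =====
def Spec_irreducible (x : Int) (y : Int) (out : Bool) : Prop := out = irreducible_alt x y
instance (x : Int) (y : Int) (out : Bool) : Decidable (Spec_irreducible x y out) := by unfold Spec_irreducible; infer_instance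

-- ===== CLAIM (what is proved, stated in full; the proofs are below) =====
def Claim_equal_irreducible : Prop := ∀ (x : Int) (y : Int), Dom_irreducible x y → Spec_irreducible x y (irreducible x y)

-- ===== LEMMAS AND PROOFS =====

theorem irrLoop_false (fuel : Nat) (n i : Int) : irrLoop fuel n i false = false := by
  cases fuel with
  | zero => rfl
  | succ f => rw [irrLoop]; simp

theorem irrLoop_true_iff : ∀ (fuel : Nat) (n i : Int), (n - i).toNat ≤ fuel →
    (irrLoop fuel n i true = true ↔ ∀ j : Int, i ≤ j → j < n → ¬ (j ∣ n)) := by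
  intro fuel
  induction fuel with
  | zero =>
    intro n i hf
    constructor
    · intro _ j hij hjn; omega
    · intro _; rfl
  | succ f ih =>
    intro n i hf
    rw [irrLoop]
    by_cases hin : i < n
    · rw [if_pos ⟨hin, rfl⟩]
      by_cases hd : (i : Int) ∣ n
      · have hm : PySem.Int.mod n i = 0 := (PySem.Int.mod_eq_zero_iff_dvd n i).mpr hd
        simp only [hm, beq_self_eq_true, if_true, irrLoop_false]
        constructor
        · intro h; exact absurd h (by simp)
        · intro h; exact absurd hd (h i le_rfl hin)
      · have hm : ¬ PySem.Int.mod n i = 0 := fun h => hd ((PySem.Int.mod_eq_zero_iff_dvd n i).mp h)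
        rw [if_neg (by simp [hm])]
        rw [ih n (i + 1) (by omega)]
        constructor
        · intro h j hij hjn
          rcases eq_or_lt_of_le hij with rfl | hlt
          · exact hd
          · exact h j hlt hjn
        · intro h j hij hjn; exact h j (by omega) hjn
    · rw [if_neg (fun h => hin h.1)]
      constructor
      · intro _ j hij hjn; omega
      · intro _; rfl

theorem altLoop_iff : ∀ (fuel : Nat) (n d : Int), 0 ≤ d → (n + 2 - d).toNat ≤ fuel →
    (altLoop fuel n d = true ↔ ∀ j : Int, d ≤ j → j * j ≤ n → ¬ (j ∣ n)) := by
  intro fuel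
  induction fuel with
  | zero =>
    intro n d hd0 hf
    have hnd : n + 2 ≤ d := by omega
    constructor
    · intro _ j hdj hjj
      exact absurd hjj (by nlinarith)
    · intro _; rfl
  | succ f ih =>
    intro n d hd0 hf
    rw [altLoop]
    by_cases hdd : d * d ≤ n
    · rw [if_pos hdd]
      by_cases hd : (d : Int) ∣ n
      · have hm : PySem.Int.mod n d = 0 := (PySem.Int.mod_eq_zero_iff_dvd n d).mpr hd
        simp only [hm, beq_self_eq_true, if_true]
        constructor
        · intro h; exact absurd h (by simp)
        · intro h; exact absurd hd (h d le_rfl hdd)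
      · have hm : ¬ PySem.Int.mod n d = 0 := fun h => hd ((PySem.Int.mod_eq_zero_iff_dvd n d).mp h)
        rw [if_neg (by simp [hm])]
        have hlt : d < n + 2 := by nlinarith [sq_nonneg (d - 1)]
        rw [ih n (d + 1) (by omega) (by omega)]
        constructor
        · intro h j hdj hjn
          rcases eq_or_lt_of_le hdj with rfl | hlt'
          · exact hd
          · exact h j hlt' hjn
        · intro h j hdj hjn; exact h j (by omega) hjn
    · rw [if_neg hdd]
      constructor
      · intro _ j hdj hjj; exact absurd hjj (by nlinarith)
      · intro _; rfl

theorem bridge (n : Int) (hn : 2 < n) :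
    (∀ j : Int, 2 ≤ j → j < n → ¬ (j ∣ n)) ↔ (∀ j : Int, 2 ≤ j → j * j ≤ n → ¬ (j ∣ n)) := by
  constructor
  · intro h j h2 hjj
    exact h j h2 (by nlinarith)
  · intro h j h2 hjn hd
    by_cases hjj : j * j ≤ n
    · exact h j h2 hjj hd
    · rw [not_le] at hjj
      obtain ⟨c, hc⟩ := hd
      have hc2 : 2 ≤ c := by nlinarith
      have hcc : c * c ≤ n := by nlinarith
      exact h c hc2 hcc ⟨j, by linarith [mul_comm j c]⟩

theorem one_eq (n : Int) : irrLoop (n - 2).toNat n 2 true = primeLike n := by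
  unfold primeLike
  by_cases hn : n ≤ 2
  · rw [show (n - 2).toNat = 0 by omega, if_pos hn]
    rfl
  · rw [not_le] at hn
    rw [if_neg (by omega : ¬ n ≤ 2)]
    rw [Bool.eq_iff_iff]
    rw [irrLoop_true_iff (n - 2).toNat n 2 (by omega),
        altLoop_iff n.toNat n 2 (by omega) (by omega)]
    exact bridge n hn

-- ===== VERDICT (by name: the statement is the Claim_ definition above) =====
theorem irreducible_spec : Claim_equal_irreducible := by
  intro x y _
  unfold Spec_irreducible irreducible irreducible_alt
  rw [one_eq, one_eq]
  by_cases hx : primeLike x = true <;> by_cases hy : primeLike y = true <;>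
    simp [hx, hy]
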